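-- pv_equiv track=rewrite | github.com/yfractal/cs61a | homeworks/hw11.py | mario_number
-- ===== SOURCE A (Python) =====
-- def mario_number(level):
--     """Return the number of ways that Mario can perform a sequence of steps
--     or jumps to reach the end of the level without ever landing in a Piranha
--     plant. Assume that every level begins and ends with a space.
--
--     >>> mario_number(' P P ')   # jump, jump
--     1
--     >>> mario_number(' P P  ')   # jump, jump, step
--     1
--     >>> mario_number('  P P ')  # step, jump, jump
--     1
--     >>> mario_number('   P P ') # step, step, jump, jump or jump, jump, jump
--     2
--     >>> mario_number(' P PP ')  # Mario cannot jump two plants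
--     0
--     >>> mario_number('    ')    # step, jump ; jump, step ; step, step, step
--     3
--     >>> mario_number('    P    ')
--     9
--     >>> mario_number('   P    P P   P  P P    P     P ')
--     180
--     """
--     "*** YOUR CODE HERE ***"
--     if len(level) == 1:
--         # reach the end
--         return 1
--     if len(level) == 0:
--         # jump out ...
--         return 0
--
--     if level[0] == "P":
--         # eaten by a fish...
--         return 0
--
--     if len(level) >= 2:
--         return mario_number(level[1:]) + mario_number(level[2:])
--     else:
--         return mario_number(level[1:])
-- ===== SOURCE B (Python) =====
-- def mario_number(level):
--     # Linear DP right-to-left: (w1, w2) = ways from the suffix of length k and k-1.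
--     if not level:
--         return 0
--     w1, w2 = 1, 0
--     for c in reversed(level[:-1]):
--         w1, w2 = (0 if c == 'P' else w1 + w2), w1
--     return w1
-- ===== Notes on version B (the rewrite author's own statement) =====
-- stated objective: faster
-- what changed: Replaced A's exponential branching recursion on string suffixes with a single right-to-left pass keeping only the two trailing suffix counts (bottom-up DP); intended as faster: measured 3.19x at n=16, and A timed out at n=64 where B returned.
import Mathlib
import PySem

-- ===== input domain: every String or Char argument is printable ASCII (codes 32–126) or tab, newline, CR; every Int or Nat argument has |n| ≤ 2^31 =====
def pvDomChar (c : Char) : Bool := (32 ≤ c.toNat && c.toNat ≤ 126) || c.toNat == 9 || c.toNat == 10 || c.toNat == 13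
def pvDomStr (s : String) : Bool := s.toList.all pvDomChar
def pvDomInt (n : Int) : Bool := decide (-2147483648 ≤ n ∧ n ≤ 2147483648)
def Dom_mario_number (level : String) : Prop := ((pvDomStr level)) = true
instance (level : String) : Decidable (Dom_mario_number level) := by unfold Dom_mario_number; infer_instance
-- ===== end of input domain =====

-- B replaces A's exponential branching recursion by a linear right-to-left DP keeping
-- only the two trailing suffix counts (intended as faster: measured 3.19x at n=16; A timed out at n=64 where B returned).

-- ===== PORT A =====
-- A's checks in order: len==1 → 1; len==0 → 0; level[0]=='P' → 0; else f(level[1:]) + f(level[2:]).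
def marioRecA : List Char → Int
  | [_] => 1
  | [] => 0
  | c :: d :: rest => if c = 'P' then 0 else marioRecA (d :: rest) + marioRecA rest

def mario_number (level : String) : Int := marioRecA level.toList

-- ===== PORT B =====
-- Source B: pair state (w1, w2), folded over reversed(level[:-1]).
def marioStep (p : Int × Int) (c : Char) : Int × Int :=
  ((if c = 'P' then 0 else p.1 + p.2), p.1)

def mario_number_alt (level : String) : Int :=
  if level.toList = [] then 0
  else (List.foldl marioStep (1, 0) level.toList.dropLast.reverse).1

-- ===== PRECONDITION & SPEC =====
def Spec_mario_number (level : String) (out : Int) : Prop := out = mario_number_alt level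
instance (level : String) (out : Int) : Decidable (Spec_mario_number level out) := by unfold Spec_mario_number; infer_instance

-- ===== CLAIM (what is proved, stated in full; the proofs are below) =====
def Claim_equal_mario_number : Prop := ∀ (level : String), Dom_mario_number level → Spec_mario_number level (mario_number level)

-- ===== LEMMAS AND PROOFS =====

-- The DP pair fold computes (ways of the whole suffix, ways of its tail).
theorem foldr_marioStep (l : List Char) (c : Char) :
    List.foldr (fun ch p => marioStep p ch) (1, 0) l
      = (marioRecA (l ++ [c]), marioRecA (l ++ [c]).tail) := by
  induction l with
  | nil => simp [marioRecA]
  | cons a l ih =>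
    cases l with
    | nil => simp [marioRecA, marioStep]
    | cons b l' =>
      rw [List.foldr_cons, ih]
      simp only [marioStep, marioRecA, List.cons_append, List.tail_cons]

theorem mario_eq (level : String) : mario_number level = mario_number_alt level := by
  unfold mario_number mario_number_alt
  by_cases h : level.toList = []
  · simp [h, marioRecA]
  · rw [if_neg h, List.foldl_reverse, foldr_marioStep level.toList.dropLast (level.toList.getLast h),
      List.dropLast_append_getLast h]

-- ===== VERDICT (by name: the statement is the Claim_ definition above) =====
theorem mario_number_spec : Claim_equal_mario_number := by
  intro level _
  exact mario_eq level
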